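-- pv_equiv track=rewrite | github.com/SpacebarNinja/CrispsBot | bot.py | format_story
-- ===== SOURCE A (Python) =====
-- def format_story(words_str: str) -> str:
--     """Format raw word tokens into a clean story string
--     - Punctuation attaches to previous word (no space before)
--     - Auto-lowercase everything
--     - Capitalize first character
--     """
--     if not words_str:
--         return ""
--     tokens = words_str.split()
--     if not tokens:
--         return ""
--
--     PUNCT = set(".,!?;:-…'\"")
--     result = []
--
--     for token in tokens:
--         is_punct = all(c in PUNCT for c in token)
--         if is_punct and result:
--             result[-1] += token
--         else:
--             result.append(token.lower())
--
--     story = " ".join(result)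
--     if story:
--         story = story[0].upper() + story[1:]
--     return story
-- ===== SOURCE B (Python) =====
-- def format_story(words_str: str) -> str:
--     """Same result as A, built back-to-front: walk the tokens in reverse,
--     carrying the pending run of punctuation-only tokens and gluing it onto
--     the word that precedes it; capitalize via slicing (no emptiness guards)."""
--     PUNCT = ".,!?;:-…'\""
--     pieces = []
--     pending = ""
--     for token in reversed(words_str.split()):
--         if all(c in PUNCT for c in token):
--             pending = token + pending
--         else:
--             pieces.append(token.lower() + pending)
--             pending = ""
--     if pending:
--         pieces.append(pending)
--     pieces.reverse()
--     story = " ".join(pieces)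
--     return story[:1].upper() + story[1:]
-- ===== Notes on version B (the rewrite author's own statement) =====
-- stated objective: alternative
-- what changed: B builds the story back-to-front: a single reversed pass carries the pending run of punctuation-only tokens and glues it onto the preceding word in one step, replacing A's forward loop that repeatedly mutates the last element of a growing result list; the guards and the final capitalization collapse into unconditional slicing.
import Mathlib
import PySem

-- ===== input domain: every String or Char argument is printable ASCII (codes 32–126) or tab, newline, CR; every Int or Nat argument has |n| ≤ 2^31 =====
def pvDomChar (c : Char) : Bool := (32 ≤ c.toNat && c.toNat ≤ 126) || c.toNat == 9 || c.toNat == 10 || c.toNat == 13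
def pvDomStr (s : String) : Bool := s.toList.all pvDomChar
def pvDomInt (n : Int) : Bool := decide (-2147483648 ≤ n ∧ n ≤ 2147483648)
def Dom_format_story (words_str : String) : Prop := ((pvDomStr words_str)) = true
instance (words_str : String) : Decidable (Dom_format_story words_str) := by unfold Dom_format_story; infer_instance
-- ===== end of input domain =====

-- B differs from A only in construction (reversed pass with a pending punctuation run); same value everywhere.

-- PUNCT = set(".,!?;:-…'\"")  (shared constant of both Pythons)
def pvPunct : List Char := ['.', ',', '!', '?', ';', ':', '-', '…', '\'', '"']

-- all(c in PUNCT for c in token)  (same test in both Pythons)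
def pvIsPunct (t : List Char) : Bool := t.all (fun c => pvPunct.contains c)

-- ===== PORT A =====
-- loop body: punct-only token (with nonempty result) is appended onto result[-1], else token.lower() is appended
def pvAStep (result : List (List Char)) (token : List Char) : List (List Char) :=
  if pvIsPunct token && !result.isEmpty then
    result.dropLast ++ [(result.getLast?.getD []) ++ token]   -- result[-1] += token
  else
    result ++ [PySem.Chars.lower token]

def format_story (words_str : String) : String :=
  if words_str = "" then "" else
  let tokens := PySem.Chars.split₀ words_str.toList       -- words_str.split()
  if tokens = [] then "" else
  let result := tokens.foldl pvAStep []
  let story := PySem.Chars.join [' '] result              -- " ".join(result)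
  -- if story: story = story[0].upper() + story[1:]
  String.ofList (if story = [] then story
             else match story with
                  | [] => []
                  | c :: rest => PySem.Chars.upperChar c :: rest)

-- ===== PORT B =====
-- loop body over reversed tokens: (pieces, pending) state
def pvBStep (st : List (List Char) × List Char) (token : List Char) : List (List Char) × List Char :=
  if pvIsPunct token then (st.1, token ++ st.2)
  else (st.1 ++ [PySem.Chars.lower token ++ st.2], [])

def format_story_alt (words_str : String) : String :=
  let st := ((PySem.Chars.split₀ words_str.toList).reverse).foldl pvBStep ([], [])
  let pieces := if st.2 ≠ [] then st.1 ++ [st.2] else st.1   -- if pending: pieces.append(pending)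
  let story := PySem.Chars.join [' '] pieces.reverse         -- pieces.reverse(); " ".join(pieces)
  -- story[:1].upper() + story[1:]
  String.ofList (match story with
             | [] => []
             | c :: rest => PySem.Chars.upperChar c :: rest)

-- ===== PRECONDITION & SPEC =====
def Spec_format_story (words_str : String) (out : String) : Prop := out = format_story_alt words_str
instance (words_str : String) (out : String) : Decidable (Spec_format_story words_str out) := by unfold Spec_format_story; infer_instance

-- ===== CLAIM (what is proved, stated in full; the proofs are below) =====
def Claim_equal_format_story : Prop := ∀ (words_str : String), Dom_format_story words_str → Spec_format_story words_str (format_story words_str)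

-- ===== LEMMAS AND PROOFS =====

-- B's state after consuming the reversal of ts
def pvG (ts : List (List Char)) : List (List Char) × List Char := ts.reverse.foldl pvBStep ([], [])

theorem pvG_nil : pvG [] = ([], []) := rfl

theorem pvG_cons (t : List Char) (ts : List (List Char)) :
    pvG (t :: ts) = pvBStep (pvG ts) t := by
  simp [pvG, List.foldl_append]

-- lowercasing fixes a punctuation-only token
theorem lowerChar_punct : ∀ c ∈ pvPunct, PySem.Chars.lowerChar c = c := by
  intro c hc
  fin_cases hc <;> rfl

theorem lower_of_punct (t : List Char) (h : pvIsPunct t = true) :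
    PySem.Chars.lower t = t := by
  have hc : ∀ c ∈ t, c ∈ pvPunct := by
    intro c hct
    simpa using (List.all_eq_true.mp h) c hct
  have hmap : t.map PySem.Chars.lowerChar = t := by
    rw [List.map_congr_left (fun c hcc => lowerChar_punct c (hc c hcc))]
    exact List.map_id t
  simpa [PySem.Chars.lower] using hmap

-- A's fold from a nonempty result equals the B state glued behind the last element
theorem pvA_fold_eq (ts : List (List Char)) :
    ∀ (init : List (List Char)) (last : List Char),
      ts.foldl pvAStep (init ++ [last]) =
        init ++ ((last ++ (pvG ts).2) :: ((pvG ts).1).reverse) := by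
  induction ts with
  | nil => intro init last; simp [pvG_nil]
  | cons t ts ih =>
    intro init last
    rw [pvG_cons]
    by_cases hp : pvIsPunct t = true
    · have hstep : pvAStep (init ++ [last]) t = init ++ [last ++ t] := by
        simp [pvAStep, hp]
      rw [List.foldl_cons, hstep, ih init (last ++ t)]
      simp [pvBStep, hp, List.append_assoc]
    · have hb : pvIsPunct t = false := by simpa using hp
      have hstep : pvAStep (init ++ [last]) t = (init ++ [last]) ++ [PySem.Chars.lower t] := by
        simp [pvAStep, hb]
      rw [List.foldl_cons, hstep, ih (init ++ [last]) (PySem.Chars.lower t)]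
      simp [pvBStep, hb]

-- every token produced by split() is nonempty
theorem split₀_go_ne_nil (s : List Char) :
    ∀ (cur : List Char) (acc : List (List Char)),
      (∀ t ∈ acc, t ≠ []) → ∀ t ∈ PySem.Chars.split₀.go s cur acc, t ≠ [] := by
  induction s with
  | nil =>
    intro cur acc hacc t ht
    by_cases hc : cur.isEmpty
    · simp [PySem.Chars.split₀.go, hc] at ht
      exact hacc t ht
    · simp [PySem.Chars.split₀.go, hc] at ht
      rcases ht with hmem | hEq
      · exact hacc t hmem
      · subst hEq
        simp [List.isEmpty_iff] at hc
        intro h0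
        exact hc (by simpa using congrArg List.reverse h0)
  | cons c rest ih =>
    intro cur acc hacc t ht
    by_cases hs : PySem.Chars.isspace c
    · by_cases hc : cur.isEmpty
      · simp [PySem.Chars.split₀.go, hs, hc] at ht
        exact ih [] acc hacc t ht
      · simp [PySem.Chars.split₀.go, hs, hc] at ht
        refine ih [] (cur.reverse :: acc) ?_ t ht
        intro u hu
        rcases List.mem_cons.mp hu with hEq | hmem
        · subst hEq
          simp [List.isEmpty_iff] at hc
          intro h0
          exact hc (by simpa using congrArg List.reverse h0)
        · exact hacc u hmem
    · simp [PySem.Chars.split₀.go, hs] at ht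
      exact ih (c :: cur) acc hacc t ht

theorem split₀_ne_nil (s : List Char) : ∀ t ∈ PySem.Chars.split₀ s, t ≠ [] := by
  intro t ht
  exact split₀_go_ne_nil s [] [] (by simp) t (by simpa [PySem.Chars.split₀] using ht)

-- A's full fold equals B's finished piece list
theorem result_eq (ts : List (List Char)) (hne : ∀ t ∈ ts, t ≠ []) :
    ts.foldl pvAStep [] =
      (if (pvG ts).2 ≠ [] then (pvG ts).1 ++ [(pvG ts).2] else (pvG ts).1).reverse := by
  cases ts with
  | nil => simp [pvG_nil]
  | cons t ts =>
    have ht : t ≠ [] := hne t (by simp)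
    rw [pvG_cons]
    by_cases hp : pvIsPunct t = true
    · have hstep : pvAStep [] t = [] ++ [PySem.Chars.lower t] := by
        simp [pvAStep]
      rw [List.foldl_cons, hstep, pvA_fold_eq ts [] (PySem.Chars.lower t), lower_of_punct t hp]
      have hpend : t ++ (pvG ts).2 ≠ [] := by
        intro h; exact ht (List.append_eq_nil_iff.mp h).1
      simp [pvBStep, hp, hpend]
    · have hb : pvIsPunct t = false := by simpa using hp
      have hstep : pvAStep [] t = [] ++ [PySem.Chars.lower t] := by
        simp [pvAStep, hb]
      rw [List.foldl_cons, hstep, pvA_fold_eq ts [] (PySem.Chars.lower t)]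
      simp [pvBStep, hb]

-- the emptiness guard before capitalization is redundant
theorem pvCap_guard (story : List Char) :
    (if story = [] then story
     else match story with
          | [] => ([] : List Char)
          | c :: rest => PySem.Chars.upperChar c :: rest) =
      (match story with
       | [] => ([] : List Char)
       | c :: rest => PySem.Chars.upperChar c :: rest) := by
  cases story <;> simp

-- ===== VERDICT (by name: the statement is the Claim_ definition above) =====
theorem format_story_spec : Claim_equal_format_story := by
  intro words_str _
  unfold Spec_format_story format_story format_story_alt
  by_cases h0 : words_str = ""
  · subst h0
    rfl
  · simp only [h0, if_false]
    by_cases htok : PySem.Chars.split₀ words_str.toList = []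
    · simp [htok]
    · simp only [htok, if_false]
      rw [result_eq _ (split₀_ne_nil words_str.toList), pvCap_guard]
      simp [pvG]
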